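-- pv_equiv track=rewrite | github.com/monkey23320/CodingTest | 프로그래머스/메뉴 리뉴얼.py | solution
-- ===== SOURCE A (Python) =====
-- from itertools import combinations
--
-- def solution(orders, course):
--     answer = []
--     menu = list(combinations(orders, 2))
--     menu_count = {}
--     max_count = {}
--     for c in course:
--         max_count[str(c)] = 0
--
--     for a, b in menu:
--         set_a, set_b = set(list(a)), set(list(b))
--         final_set = sorted(list(set_a & set_b))
--
--         for i in range(1,len(final_set)+1):
--             if i in course:
--                 for m in list(combinations(final_set, i)):
--                     course_name = ''.join(list(m))
--                     if course_name in menu_count: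
--                         menu_count[course_name] += 1
--                     else:
--                         menu_count[course_name] = 1
--
--     menu_count = sorted(menu_count.items(), key = lambda x : x[1], reverse=True)
--
--     for m, cnt in menu_count:
--         if max_count[str(len(m))] == 0:
--             max_count[str(len(m))] = cnt
--             answer.append(m)
--             continue
--
--         if max_count[str(len(m))] == cnt:
--             answer.append(m)
--
--     answer.sort()
--     return answer
-- ===== SOURCE B (Python) =====
-- from itertools import combinations
--
-- def solution(orders, course):
--     course_set = set(course)
--     contain = {}
--     for order in orders:
--         chars = sorted(set(order))
--         for i in range(1, len(chars) + 1):
--             if i in course_set: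
--                 for m in combinations(chars, i):
--                     name = ''.join(m)
--                     contain[name] = contain.get(name, 0) + 1
--     pair_count = {name: k * (k - 1) // 2 for name, k in contain.items() if k >= 2}
--     best = {}
--     for name, cnt in pair_count.items():
--         L = len(name)
--         best[L] = max(best.get(L, 0), cnt)
--     return sorted(name for name, cnt in pair_count.items() if cnt == best[len(name)])
-- ===== Notes on version B (the rewrite author's own statement) =====
-- stated objective: faster
-- what changed: Instead of enumerating shared sub-combinations for every pair of orders (O(n^2) pairs), B counts in one pass over orders how many orders contain each combination and derives the pair count by the closed form k*(k-1)//2, then takes the per-size maximum with a dictionary instead of sorting all counts.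
import Mathlib
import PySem

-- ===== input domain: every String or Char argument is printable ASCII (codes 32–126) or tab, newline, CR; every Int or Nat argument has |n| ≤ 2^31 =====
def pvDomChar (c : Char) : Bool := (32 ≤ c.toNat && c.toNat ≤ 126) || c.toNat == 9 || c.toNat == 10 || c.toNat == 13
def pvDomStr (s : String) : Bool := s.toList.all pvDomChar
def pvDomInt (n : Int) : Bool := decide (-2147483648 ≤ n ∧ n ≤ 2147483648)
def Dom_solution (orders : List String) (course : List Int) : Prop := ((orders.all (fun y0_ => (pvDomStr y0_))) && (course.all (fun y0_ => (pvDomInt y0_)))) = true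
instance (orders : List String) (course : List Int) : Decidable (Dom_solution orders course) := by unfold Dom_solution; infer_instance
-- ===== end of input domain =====

-- B counts per order instead of per pair of orders and uses the closed form k*(k-1)//2 (faster);
-- the equivalence of the two counting strategies is proved below.  Return values only; neither mutates its arguments.

-- ===== PORT A =====

-- list(itertools.combinations(orders, 2)) as a list of pairs, in CPython's order
def pvPairs2 {α : Type} : List α → List (α × α)
  | [] => []
  | x :: xs => xs.map (fun y => (x, y)) ++ pvPairs2 xs

-- sorted(list(set(list(a)) & set(list(b))))
def pvInterList (a b : String) : List Char :=
  PySem.List.sorted (PySem.Set.inter (PySem.Set.ofList a.toList) (PySem.Set.ofList b.toList)) (fun x => x) false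

-- A's innermost 'if course_name in menu_count: += 1 else: = 1'
def pvStepA (d : PySem.Dict String Int) (name : String) : PySem.Dict String Int :=
  if d.contains name then d.insert name (d.getD name 0 + 1) else d.insert name 1

-- one iteration of A's 'for a, b in menu' loop (''.join(list(m)) on a list of chars is String.ofList)
def pvInnerA (course : List Int) (d : PySem.Dict String Int) (ab : String × String) : PySem.Dict String Int :=
  let finalSet := pvInterList ab.1 ab.2
  (PySem.List.pyRange 1 ((finalSet.length : Int) + 1) 1).foldl (fun d i =>
    if i ∈ course then
      (PySem.List.combinations finalSet i.toNat).foldl (fun d m => pvStepA d (String.ofList m)) d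
    else d) d

-- one iteration of A's final 'for m, cnt in menu_count' loop.  Python reads max_count[str(len(m))],
-- which would raise KeyError on a missing key; that key is always present (len(m) is in course),
-- so the total getD with default 0 agrees with Python wherever Python returns.
def pvSelStep (st : List String × PySem.Dict String Int) (p : String × Int) :
    List String × PySem.Dict String Int :=
  let key := PySem.Int.toStr (PySem.Str.len p.1)
  if st.2.getD key 0 == 0 then (st.1 ++ [p.1], st.2.insert key p.2)
  else if st.2.getD key 0 == p.2 then (st.1 ++ [p.1], st.2)
  else st

def solution (orders : List String) (course : List Int) : List String :=
  let maxCount0 : PySem.Dict String Int :=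
    course.foldl (fun d c => d.insert (PySem.Int.toStr c) 0) PySem.Dict.empty
  let menuCount : PySem.Dict String Int := (pvPairs2 orders).foldl (pvInnerA course) PySem.Dict.empty
  let menuSorted := PySem.List.sorted menuCount.items (fun x => x.2) true
  let fin := menuSorted.foldl pvSelStep (([] : List String), maxCount0)
  PySem.List.sorted fin.1 (fun x => x) false

-- ===== PORT B =====

-- sorted(set(order))
def pvChars (s : String) : List Char :=
  PySem.List.sorted (PySem.Set.ofList s.toList) (fun x => x) false

-- B's 'contain[name] = contain.get(name, 0) + 1'
def pvStepB (d : PySem.Dict String Int) (name : String) : PySem.Dict String Int :=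
  d.insert name (d.getD name 0 + 1)

-- one iteration of B's 'for order in orders' loop
def pvInnerB (courseSet : PySem.Set Int) (d : PySem.Dict String Int) (order : String) :
    PySem.Dict String Int :=
  let chars := pvChars order
  (PySem.List.pyRange 1 ((chars.length : Int) + 1) 1).foldl (fun d i =>
    if courseSet.contains i then
      (PySem.List.combinations chars i.toNat).foldl (fun d m => pvStepB d (String.ofList m)) d
    else d) d

def solution_alt (orders : List String) (course : List Int) : List String :=
  let courseSet : PySem.Set Int := PySem.Set.ofList course
  let contain : PySem.Dict String Int := orders.foldl (pvInnerB courseSet) PySem.Dict.empty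
  let pairCount : PySem.Dict String Int :=
    contain.items.foldl (fun d p =>
      if 2 ≤ p.2 then d.insert p.1 (PySem.Int.floordiv (p.2 * (p.2 - 1)) 2) else d) PySem.Dict.empty
  let best : PySem.Dict Int Int :=
    pairCount.items.foldl (fun d p =>
      d.insert (PySem.Str.len p.1) (max (d.getD (PySem.Str.len p.1) 0) p.2)) PySem.Dict.empty
  PySem.List.sorted
    ((pairCount.items.filter (fun p => p.2 == best.getD (PySem.Str.len p.1) 0)).map (fun p => p.1))
    (fun x => x) false

-- ===== PRECONDITION & SPEC =====
def Spec_solution (orders : List String) (course : List Int) (out : List String) : Prop := out = solution_alt orders course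
instance (orders : List String) (course : List Int) (out : List String) : Decidable (Spec_solution orders course out) := by unfold Spec_solution; infer_instance

-- ===== CLAIM (what is proved, stated in full; the proofs are below) =====
def Claim_equal_solution : Prop := ∀ (orders : List String) (course : List Int), Dom_solution orders course → Spec_solution orders course (solution orders course)

-- ===== LEMMAS AND PROOFS =====

-- the combination strings generated from one sorted character list L, in generation order
def pvGen (course : List Int) (L : List Char) : List String :=
  (PySem.List.pyRange 1 ((L.length : Int) + 1) 1).flatMap (fun i =>
    if i ∈ course then (PySem.List.combinations L i.toNat).map String.ofList else [])

-- every string A's counting loop increments, with multiplicity, in order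
def pvBigA (orders : List String) (course : List Int) : List String :=
  (pvPairs2 orders).flatMap (fun ab => pvGen course (pvInterList ab.1 ab.2))

-- every string B's counting loop increments, with multiplicity, in order
def pvBigB (orders : List String) (course : List Int) : List String :=
  orders.flatMap (fun s => pvGen course (pvChars s))

-- 'order s contains the combination name (and its size is in course)'
def pvQ (course : List Int) (name : String) (s : String) : Bool :=
  decide (name.toList.Sublist (pvChars s)) && decide (name.toList ≠ []) &&
    decide ((name.toList.length : Int) ∈ course)

-- the maximal count among the items of a given key length (0 if there is none)
def pvMF (items : List (String × Int)) (L : Int) : Int :=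
  ((items.filter (fun p => PySem.Str.len p.1 == L)).map (fun p => p.2)).foldl max 0

-- ---- str(n) is injective on nonnegative integers ----

lemma pvToDigitsCore_eq (f : Nat) : ∀ (n : Nat) (l : List Char), 0 < n → n < f →
    Nat.toDigitsCore 10 f n l = ((Nat.digits 10 n).map Nat.digitChar).reverse ++ l := by
  induction f with
  | zero => intro n l h1 h2; omega
  | succ f ih =>
    intro n l h1 h2
    rw [Nat.toDigitsCore]
    by_cases hd : n / 10 = 0
    · simp only [hd, if_true]
      rw [Nat.digits_def' (by norm_num) h1, hd]
      simp
    · simp only [hd, if_false]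
      rw [ih (n / 10) _ (Nat.pos_of_ne_zero hd) (by
        have := Nat.div_lt_self h1 (by norm_num : (1:Nat) < 10); omega)]
      rw [Nat.digits_def' (by norm_num) h1]
      simp

lemma pvDigitChar_inj (a b : Nat) (ha : a < 10) (hb : b < 10) (h : Nat.digitChar a = Nat.digitChar b) : a = b := by
  interval_cases a <;> interval_cases b <;> simp_all [Nat.digitChar]

lemma pvMapDigitChar_inj : ∀ (l1 l2 : List Nat), (∀ x ∈ l1, x < 10) → (∀ x ∈ l2, x < 10) →
    l1.map Nat.digitChar = l2.map Nat.digitChar → l1 = l2 := by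
  intro l1
  induction l1 with
  | nil => intro l2 _ _ h; cases l2 <;> simp_all
  | cons a t ih =>
    intro l2 h1 h2 h
    cases l2 with
    | nil => simp_all
    | cons b t2 =>
      simp only [List.map_cons, List.cons.injEq] at h
      have := pvDigitChar_inj a b (h1 a (by simp)) (h2 b (by simp)) h.1
      have := ih t2 (fun x hx => h1 x (by simp [hx])) (fun x hx => h2 x (by simp [hx])) h.2
      simp_all

lemma pvToDigits_pos (n : Nat) (hn : 0 < n) :
    Nat.toDigits 10 n = ((Nat.digits 10 n).map Nat.digitChar).reverse := by
  rw [Nat.toDigits, pvToDigitsCore_eq _ n _ hn (by omega)]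
  simp

lemma pvDigits_eq_of_toDigits_eq (m n : Nat) (hm : 0 < m) (hn : 0 < n)
    (h : Nat.toDigits 10 m = Nat.toDigits 10 n) : m = n := by
  rw [pvToDigits_pos m hm, pvToDigits_pos n hn] at h
  have h' := congrArg List.reverse h
  simp only [List.reverse_reverse] at h'
  have := pvMapDigitChar_inj _ _ (fun x hx => Nat.digits_lt_base (by norm_num) hx)
    (fun x hx => Nat.digits_lt_base (by norm_num) hx) h'
  calc m = Nat.ofDigits 10 (Nat.digits 10 m) := (Nat.ofDigits_digits 10 m).symm
  _ = Nat.ofDigits 10 (Nat.digits 10 n) := by rw [this]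
  _ = n := Nat.ofDigits_digits 10 n

lemma pvToDigits_ne_zero_case (n : Nat) (hn : 0 < n) : Nat.toDigits 10 n ≠ Nat.toDigits 10 0 := by
  rw [pvToDigits_pos n hn]
  intro h
  have h0 : Nat.toDigits 10 0 = ['0'] := rfl
  rw [h0] at h
  have h' := congrArg List.reverse h
  simp only [List.reverse_reverse] at h'
  have h2 : ([0] : List Nat).map Nat.digitChar = ['0'] := rfl
  have := pvMapDigitChar_inj (Nat.digits 10 n) [0]
    (fun x hx => Nat.digits_lt_base (by norm_num) hx) (by simp)
    (by rw [h', h2]; rfl)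
  have h3 := Nat.ofDigits_digits 10 n
  rw [this] at h3
  simp [Nat.ofDigits] at h3
  omega

lemma pvToDigits_inj (m n : Nat) (h : Nat.toDigits 10 m = Nat.toDigits 10 n) : m = n := by
  rcases Nat.eq_zero_or_pos m with hm | hm <;> rcases Nat.eq_zero_or_pos n with hn | hn
  · omega
  · subst hm; exact absurd h.symm (pvToDigits_ne_zero_case n hn)
  · subst hn; exact absurd h (pvToDigits_ne_zero_case m hm)
  · exact pvDigits_eq_of_toDigits_eq m n hm hn h

lemma pvToStr_inj (a b : Int) (ha : 0 ≤ a) (hb : 0 ≤ b)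
    (h : PySem.Int.toStr a = PySem.Int.toStr b) : a = b := by
  have h' := congrArg String.toList h
  rw [PySem.Int.toList_toStr, PySem.Int.toList_toStr] at h'
  unfold PySem.Int.toChars at h'
  simp only [if_neg (by omega : ¬ (a < 0)), if_neg (by omega : ¬ (b < 0))] at h'
  have := pvToDigits_inj _ _ h'
  omega

lemma pvLen_nonneg (s : String) : 0 ≤ PySem.Str.len s := by
  rw [PySem.Str.len_eq]; positivity

-- ---- order facts ----

lemma pvSublist_of_subset : ∀ (L c : List Char), L.Pairwise (· < ·) → c.Pairwise (· < ·) →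
    (∀ x ∈ c, x ∈ L) → c.Sublist L := by
  intro L
  induction L with
  | nil => intro c _ _ h
           cases c with
           | nil => exact List.Sublist.refl _
           | cons a t => exact absurd (h a (by simp)) (by simp)
  | cons b L' ih =>
    intro c hL hc hsub
    cases c with
    | nil => exact List.nil_sublist _
    | cons a t =>
      by_cases hab : a = b
      · subst hab
        apply List.Sublist.cons₂
        apply ih t (List.pairwise_cons.mp hL).2 (List.pairwise_cons.mp hc).2
        intro x hx
        have hmem := hsub x (by simp [hx])
        have hgt : a < x := (List.pairwise_cons.mp hc).1 x hx
        rcases List.mem_cons.mp hmem with h | h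
        · exact absurd (h ▸ hgt) (lt_irrefl _)
        · exact h
      · apply List.Sublist.cons
        apply ih (a :: t) (List.pairwise_cons.mp hL).2 hc
        intro x hx
        have hmem := hsub x hx
        rcases List.mem_cons.mp hmem with h | h
        · -- x = b (the head of L); impossible: b is strictly below a ≤ every element of a::t
          exfalso
          have hba : b < a := by
            have hma := hsub a (by simp)
            rcases List.mem_cons.mp hma with h' | h'
            · exact absurd h' hab
            · exact (List.pairwise_cons.mp hL).1 a h'
          rcases List.mem_cons.mp hx with h2 | h2
          · rw [h2] at h; exact hab h
          · have hax : a < x := (List.pairwise_cons.mp hc).1 x h2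
            rw [h] at hax
            exact absurd hba (lt_asymm hax)
        · exact h

lemma pvSorted_id_pairwise_lt (xs : List Char) (h : xs.Nodup) :
    (PySem.List.sorted xs (fun x => x) false).Pairwise (· < ·) := by
  have hle := PySem.List.sorted_pairwise xs (fun x => x)
  have hnd : (PySem.List.sorted xs (fun x => x) false).Nodup :=
    (PySem.List.sorted_perm xs (fun x => x) false).nodup_iff.mpr h
  have hand := List.Pairwise.and hle hnd
  exact hand.imp (fun h => lt_of_le_of_ne h.1 h.2)

lemma pvChars_pairwise (s : String) : (pvChars s).Pairwise (· < ·) :=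
  pvSorted_id_pairwise_lt _ (PySem.Set.nodup_ofList _)

lemma pvInterList_pairwise (a b : String) : (pvInterList a b).Pairwise (· < ·) :=
  pvSorted_id_pairwise_lt _ (PySem.Set.nodup_inter _ _ (PySem.Set.nodup_ofList _))

lemma pvMem_interList (a b : String) (x : Char) :
    x ∈ pvInterList a b ↔ x ∈ pvChars a ∧ x ∈ pvChars b := by
  unfold pvInterList pvChars
  rw [PySem.List.mem_sorted, PySem.List.mem_sorted, PySem.List.mem_sorted,
    PySem.Set.mem_inter]

lemma pvSublist_interList (a b : String) (c : List Char) :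
    c.Sublist (pvInterList a b) ↔ c.Sublist (pvChars a) ∧ c.Sublist (pvChars b) := by
  constructor
  · intro h
    have hc : c.Pairwise (· < ·) := List.Pairwise.sublist h (pvInterList_pairwise a b)
    have hsub : ∀ x ∈ c, x ∈ pvInterList a b := fun x hx => h.mem hx
    constructor
    · exact pvSublist_of_subset _ _ (pvChars_pairwise a) hc
        (fun x hx => ((pvMem_interList a b x).mp (hsub x hx)).1)
    · exact pvSublist_of_subset _ _ (pvChars_pairwise b) hc
        (fun x hx => ((pvMem_interList a b x).mp (hsub x hx)).2)
  · rintro ⟨h1, h2⟩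
    have hc : c.Pairwise (· < ·) := List.Pairwise.sublist h1 (pvChars_pairwise a)
    exact pvSublist_of_subset _ _ (pvInterList_pairwise a b) hc
      (fun x hx => (pvMem_interList a b x).mpr ⟨h1.mem hx, h2.mem hx⟩)

-- ---- counting ----

lemma pvNodup_combinations (r : Nat) : ∀ (L : List Char), L.Nodup →
    (PySem.List.combinations L r).Nodup := by
  induction r with
  | zero => intro L _; rw [PySem.List.combinations_zero]; simp
  | succ r ih =>
    intro L hL
    induction L with
    | nil => rw [PySem.List.combinations_nil_succ]; simp
    | cons x xs ihL =>
      rw [PySem.List.combinations_cons_succ]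
      have hx : x ∉ xs := (List.nodup_cons.mp hL).1
      have hxs : xs.Nodup := (List.nodup_cons.mp hL).2
      apply List.Nodup.append
      · exact (ih xs hxs).map (fun a b h => by simpa using h)
      · exact ihL hxs
      · intro c hc1 hc2
        rcases List.mem_map.mp hc1 with ⟨c', _, rfl⟩
        have hsub := (PySem.List.mem_combinations_iff _ _ _).mp hc2 |>.1
        have : x ∈ xs := hsub.mem (by simp)
        exact hx this

lemma pvOfList_inj : Function.Injective String.ofList :=
  Function.LeftInverse.injective (fun l => String.toList_ofList)

lemma pvSum_ite (f : Int → Nat) (v : Int) : ∀ (l : List Int), l.Nodup →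
    (∀ i ∈ l, i ≠ v → f i = 0) → (l.map f).sum = if v ∈ l then f v else 0 := by
  intro l
  induction l with
  | nil => simp
  | cons a t ih =>
    intro hnd hf
    simp only [List.map_cons, List.sum_cons]
    by_cases hav : a = v
    · subst hav
      have ht0 : (t.map f).sum = if a ∈ t then f a else 0 :=
        ih (List.nodup_cons.mp hnd).2 (fun i hi => hf i (by simp [hi]))
      rw [ht0, if_neg ((List.nodup_cons.mp hnd).1), if_pos (by simp)]
      simp
    · rw [hf a (by simp) hav]
      rw [ih (List.nodup_cons.mp hnd).2 (fun i hi => hf i (by simp [hi]))]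
      by_cases hvt : v ∈ t
      · rw [if_pos hvt, if_pos (by simp [hvt])]; simp
      · rw [if_neg hvt, if_neg (by simp [hvt, Ne.symm hav])]

lemma pvCount_gen (course : List Int) (L : List Char) (hL : L.Pairwise (· < ·)) (name : String) :
    (pvGen course L).count name =
      if name.toList.Sublist L ∧ name.toList ≠ [] ∧ ((name.toList.length : Int) ∈ course)
      then 1 else 0 := by
  have hLnd : L.Nodup := hL.imp (fun h => ne_of_lt h)
  set c := name.toList with hc
  have hname : name = String.ofList c := (String.ofList_toList (s := name)).symm
  unfold pvGen
  rw [List.count_flatMap]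
  set f : Int → Nat := fun i =>
    List.count name (if i ∈ course then (PySem.List.combinations L i.toNat).map String.ofList else []) with hfdef
  have hmapeq : (List.map (List.count name ∘ fun i =>
      if i ∈ course then (PySem.List.combinations L i.toNat).map String.ofList else [])
      (PySem.List.pyRange 1 (↑L.length + 1) 1)) = (PySem.List.pyRange 1 (↑L.length + 1) 1).map f := rfl
  rw [hmapeq]
  have hcount : ∀ (r : Nat), List.count name ((PySem.List.combinations L r).map String.ofList)
      = if c.Sublist L ∧ c.length = r then 1 else 0 := by
    intro r
    rw [hname, List.count_map_of_injective _ _ pvOfList_inj]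
    by_cases hmem : c ∈ PySem.List.combinations L r
    · rw [if_pos ((PySem.List.mem_combinations_iff L r c).mp hmem)]
      exact List.count_eq_one_of_mem (pvNodup_combinations r L hLnd) hmem
    · rw [if_neg (fun h => hmem ((PySem.List.mem_combinations_iff L r c).mpr h))]
      exact List.count_eq_zero_of_not_mem hmem
  rw [pvSum_ite f ((c.length : Int)) _ (PySem.List.nodup_pyRange_one 1 (↑L.length + 1))]
  · by_cases h1 : c.Sublist L
    · by_cases h2 : c ≠ []
      · have hlen : 1 ≤ c.length := by
          cases hcc : c with
          | nil => exact absurd hcc h2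
          | cons _ _ => simp [hcc]
        have hle : c.length ≤ L.length := h1.length_le
        have hmem : ((c.length : Int)) ∈ PySem.List.pyRange 1 (↑L.length + 1) 1 := by
          rw [PySem.List.mem_pyRange_one]; omega
        rw [if_pos hmem, hfdef]
        by_cases h3 : ((c.length : Int)) ∈ course
        · simp only [if_pos h3]
          rw [hcount]
          rw [if_pos ⟨h1, by simp⟩, if_pos ⟨h1, h2, h3⟩]
        · simp only [if_neg h3, List.count_nil]
          rw [if_neg (fun h => h3 h.2.2)]
      · push_neg at h2
        have hlen0 : c.length = 0 := by rw [h2]; rfl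
        rw [if_neg (by rw [PySem.List.mem_pyRange_one, hlen0]; omega)]
        rw [if_neg (fun h => by exact h.2.1 h2)]
    · have hrhs : (if c.Sublist L ∧ c ≠ [] ∧ ((c.length : Int)) ∈ course then 1 else 0) = 0 :=
        if_neg (fun h => h1 h.1)
      rw [hrhs]
      by_cases hmem : ((c.length : Int)) ∈ PySem.List.pyRange 1 (↑L.length + 1) 1
      · rw [if_pos hmem, hfdef]
        by_cases h3 : ((c.length : Int)) ∈ course
        · simp only [if_pos h3]
          rw [hcount]
          exact if_neg (fun h => h1 h.1)
        · simp only [if_neg h3, List.count_nil]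
      · rw [if_neg hmem]
  · intro i hi hne
    rw [hfdef]
    by_cases h3 : i ∈ course
    · simp only [if_pos h3]
      have h1i : 1 ≤ i := (PySem.List.mem_pyRange_one.mp hi).1
      have : ¬ (c.Sublist L ∧ c.length = i.toNat) := by
        rintro ⟨_, hlen⟩
        apply hne
        omega
      rw [hname, List.count_map_of_injective _ _ pvOfList_inj]
      exact List.count_eq_zero_of_not_mem (fun h => this ((PySem.List.mem_combinations_iff L i.toNat c).mp h))
    · simp [h3]

lemma pvCountP_pairs2 {α : Type} (xs : List α) (p : α → Bool) :
    (pvPairs2 xs).countP (fun ab => p ab.1 && p ab.2) = Nat.choose (xs.countP p) 2 := by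
  induction xs with
  | nil => simp [pvPairs2]
  | cons x xs ih =>
    rw [pvPairs2, List.countP_append, List.countP_map, ih, List.countP_cons]
    by_cases hx : p x = true
    · have h1 : List.countP ((fun ab => p ab.1 && p ab.2) ∘ fun y => (x, y)) xs = List.countP p xs :=
        List.countP_congr (fun a _ => by simp [hx])
      rw [h1, hx]
      simp only [if_pos trivial]
      show List.countP p xs + (List.countP p xs).choose 2 = (List.countP p xs + 1).choose (1 + 1)
      rw [Nat.choose_succ_succ', Nat.choose_one_right]
    · have h1 : List.countP ((fun ab => p ab.1 && p ab.2) ∘ fun y => (x, y)) xs = 0 := by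
        rw [List.countP_eq_zero]
        intro a _
        simp [hx]
      rw [h1]
      simp [hx]

lemma pvQ_iff (course : List Int) (name : String) (s : String) :
    pvQ course name s = true ↔
      (name.toList.Sublist (pvChars s) ∧ name.toList ≠ [] ∧ ((name.toList.length : Int) ∈ course)) := by
  unfold pvQ
  simp only [Bool.and_eq_true, decide_eq_true_eq]
  tauto

lemma pvSum_map_ite_countP {α : Type} (l : List α) (p : α → Bool) :
    (l.map (fun x => if p x = true then 1 else 0)).sum = l.countP p := by
  induction l with
  | nil => simp
  | cons a t ih =>
    rw [List.map_cons, List.sum_cons, ih, List.countP_cons]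
    by_cases h : p a = true <;> simp [h] <;> omega

lemma pvCount_bigB (orders : List String) (course : List Int) (name : String) :
    (pvBigB orders course).count name = orders.countP (pvQ course name) := by
  induction orders with
  | nil => simp [pvBigB]
  | cons s t ih =>
    have hsplit : pvBigB (s :: t) course = pvGen course (pvChars s) ++ pvBigB t course := by
      simp [pvBigB]
    rw [hsplit, List.count_append, ih, pvCount_gen course (pvChars s) (pvChars_pairwise s) name,
      List.countP_cons]
    by_cases h : (name.toList.Sublist (pvChars s) ∧ name.toList ≠ [] ∧ ((name.toList.length : Int) ∈ course))
    · rw [if_pos h, (pvQ_iff course name s).mpr h]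
      simp only [if_pos trivial]
      omega
    · rw [if_neg h]
      have hq : pvQ course name s = false := by
        rw [Bool.eq_false_iff]
        intro ht
        exact h ((pvQ_iff course name s).mp ht)
      rw [hq]
      simp

lemma pvCount_bigA (orders : List String) (course : List Int) (name : String) :
    (pvBigA orders course).count name = Nat.choose (orders.countP (pvQ course name)) 2 := by
  unfold pvBigA
  rw [List.count_flatMap]
  have hpair : ∀ ab : String × String,
      (List.count name ∘ fun ab => pvGen course (pvInterList ab.1 ab.2)) ab
        = if (fun ab : String × String => pvQ course name ab.1 && pvQ course name ab.2) ab = true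
          then 1 else 0 := by
    intro ab
    show (pvGen course (pvInterList ab.1 ab.2)).count name
      = if (pvQ course name ab.1 && pvQ course name ab.2) = true then 1 else 0
    rw [pvCount_gen _ _ (pvInterList_pairwise _ _) name]
    simp only [pvSublist_interList]
    by_cases hP : ((name.toList.Sublist (pvChars ab.1) ∧ name.toList.Sublist (pvChars ab.2)) ∧
        name.toList ≠ [] ∧ ((name.toList.length : Int) ∈ course))
    · rw [if_pos hP]
      have q1 : pvQ course name ab.1 = true := (pvQ_iff course name ab.1).mpr ⟨hP.1.1, hP.2⟩
      have q2 : pvQ course name ab.2 = true := (pvQ_iff course name ab.2).mpr ⟨hP.1.2, hP.2⟩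
      rw [q1, q2]
      rfl
    · rw [if_neg hP]
      have hboth : ¬(pvQ course name ab.1 = true ∧ pvQ course name ab.2 = true) := by
        rintro ⟨q1, q2⟩
        have h1 := (pvQ_iff course name ab.1).mp q1
        have h2 := (pvQ_iff course name ab.2).mp q2
        exact hP ⟨⟨h1.1, h2.1⟩, h1.2⟩
      cases hq1 : pvQ course name ab.1 <;> cases hq2 : pvQ course name ab.2 <;> simp_all
  rw [List.map_congr_left (fun ab _ => hpair ab), pvSum_map_ite_countP, pvCountP_pairs2]

-- ---- the two counting loops build the counters of pvBigA / pvBigB ----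

lemma pvStepA_eq_stepB : pvStepA = pvStepB := by
  funext d name
  unfold pvStepA pvStepB
  by_cases h : d.contains name
  · rw [if_pos h]
  · rw [if_neg h]
    have h0 : d.getD name 0 = 0 := by
      rw [PySem.Dict.getD]
      rw [PySem.Dict.contains_eq_isSome_get?] at h
      cases hg : d.get? name with
      | none => rfl
      | some v => rw [hg] at h; simp at h
    rw [h0]
    norm_num

lemma pvFoldl_if_flatMap {α β : Type} (l : List α) (step : β → String → β) (d : β)
    (C : α → Prop) [DecidablePred C] (g : α → List String) :
    l.foldl (fun d i => if C i then (g i).foldl step d else d) d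
      = (l.flatMap (fun i => if C i then g i else [])).foldl step d := by
  induction l generalizing d with
  | nil => simp
  | cons a t ih =>
    rw [List.flatMap_cons, List.foldl_append, List.foldl_cons]
    by_cases h : C a
    · rw [if_pos h, if_pos h, ih]
    · rw [if_neg h, if_neg h, ih]
      simp

lemma pvInnerA_eq (course : List Int) (d : PySem.Dict String Int) (ab : String × String) :
    pvInnerA course d ab = (pvGen course (pvInterList ab.1 ab.2)).foldl pvStepB d := by
  unfold pvInnerA pvGen
  rw [pvStepA_eq_stepB]
  have h1 : ∀ (L : List Char) (r : Nat) (d : PySem.Dict String Int),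
      (PySem.List.combinations L r).foldl (fun d m => pvStepB d (String.ofList m)) d
        = ((PySem.List.combinations L r).map String.ofList).foldl pvStepB d := by
    intro L r d; rw [List.foldl_map]
  simp only [h1]
  exact pvFoldl_if_flatMap _ pvStepB d _ _

lemma pvInnerB_eq (course : List Int) (d : PySem.Dict String Int) (s : String) :
    pvInnerB (PySem.Set.ofList course) d s = (pvGen course (pvChars s)).foldl pvStepB d := by
  unfold pvInnerB pvGen
  have hc : ∀ i : Int, ((PySem.Set.ofList course).contains i = true) = (i ∈ course) := by
    intro i
    exact propext ((PySem.Set.contains_iff _ _).trans (PySem.Set.mem_ofList _ _))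
  simp only [hc]
  have h1 : ∀ (L : List Char) (r : Nat) (d : PySem.Dict String Int),
      (PySem.List.combinations L r).foldl (fun d m => pvStepB d (String.ofList m)) d
        = ((PySem.List.combinations L r).map String.ofList).foldl pvStepB d := by
    intro L r d; rw [List.foldl_map]
  simp only [h1]
  exact pvFoldl_if_flatMap _ pvStepB d _ _

lemma pvFoldl_stepB_flatMap {α : Type} (l : List α) (g : α → List String) (d : PySem.Dict String Int) :
    l.foldl (fun d x => (g x).foldl pvStepB d) d = (l.flatMap g).foldl pvStepB d := by
  rw [List.flatMap_def, List.foldl_flatten, List.foldl_map]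

lemma pvMenuCount_eq (orders : List String) (course : List Int) :
    (pvPairs2 orders).foldl (pvInnerA course) PySem.Dict.empty = PySem.Dict.counter (pvBigA orders course) := by
  have h1 : (pvPairs2 orders).foldl (pvInnerA course) PySem.Dict.empty
      = (pvPairs2 orders).foldl (fun d ab => (pvGen course (pvInterList ab.1 ab.2)).foldl pvStepB d) PySem.Dict.empty := by
    congr 1
    funext d ab
    exact pvInnerA_eq course d ab
  rw [h1, pvFoldl_stepB_flatMap]
  exact PySem.Dict.foldl_insert_getD_add_one_eq_counter _

lemma pvContain_eq (orders : List String) (course : List Int) :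
    orders.foldl (pvInnerB (PySem.Set.ofList course)) PySem.Dict.empty
      = PySem.Dict.counter (pvBigB orders course) := by
  have h1 : orders.foldl (pvInnerB (PySem.Set.ofList course)) PySem.Dict.empty
      = orders.foldl (fun d s => (pvGen course (pvChars s)).foldl pvStepB d) PySem.Dict.empty := by
    congr 1
    funext d s
    exact pvInnerB_eq course d s
  rw [h1, pvFoldl_stepB_flatMap]
  exact PySem.Dict.foldl_insert_getD_add_one_eq_counter _

-- ---- item lists ----

lemma pvFoldl_if_filter {β γ : Type} (l : List γ) (cond : γ → Prop) [DecidablePred cond]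
    (g : β → γ → β) (d : β) :
    l.foldl (fun d p => if cond p then g d p else d) d
      = (l.filter (fun p => decide (cond p))).foldl g d := by
  induction l generalizing d with
  | nil => simp
  | cons a t ih =>
    by_cases h : cond a
    · rw [List.foldl_cons, if_pos h, List.filter_cons_of_pos (by simp [h]), List.foldl_cons, ih]
    · rw [List.foldl_cons, if_neg h, List.filter_cons_of_neg (by simp [h]), ih]

lemma pvChoose2_int (n : Nat) :
    PySem.Int.floordiv ((n : Int) * ((n : Int) - 1)) 2 = (Nat.choose n 2 : Int) := by
  cases n with
  | zero => decide
  | succ m =>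
    have h1 : ((m + 1 : Nat) : Int) * (((m + 1 : Nat) : Int) - 1) = (((m + 1) * m : Nat) : Int) := by
      push_cast; ring
    rw [h1]
    have h2 := PySem.Int.floordiv_natCast ((m + 1) * m) 2
    have h3 : ((2 : Nat) : Int) = 2 := by norm_num
    rw [h3] at h2
    rw [h2, Nat.choose_two_right]
    simp

-- ---- B's best dictionary computes pvMF ----

lemma pvBest_getD (items : List (String × Int)) (L : Int) :
    ((items.foldl (fun d p =>
        d.insert (PySem.Str.len p.1) (max (d.getD (PySem.Str.len p.1) 0) p.2))
        PySem.Dict.empty).getD L 0) = pvMF items L := by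
  have hgen : ∀ (l : List (String × Int)) (d : PySem.Dict Int Int) (L : Int),
      ((l.foldl (fun d p =>
          d.insert (PySem.Str.len p.1) (max (d.getD (PySem.Str.len p.1) 0) p.2)) d).getD L 0)
        = ((l.filter (fun p => PySem.Str.len p.1 == L)).map (fun p => p.2)).foldl max (d.getD L 0) := by
    intro l
    induction l with
    | nil => intro d L; rfl
    | cons p t ih =>
      intro d L
      rw [List.foldl_cons, ih]
      by_cases h : PySem.Str.len p.1 = L
      · rw [List.filter_cons_of_pos (by simpa using h), List.map_cons, List.foldl_cons]
        congr 1
        rw [PySem.Dict.getD_insert, if_pos h.symm, h]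
      · rw [List.filter_cons_of_neg (by simpa using h)]
        congr 1
        rw [PySem.Dict.getD_insert, if_neg (fun hh => h hh.symm)]
  rw [hgen items PySem.Dict.empty L]
  rfl

-- ---- A's selection loop keeps exactly the per-length maxima ----

lemma pvFoldl_max_const {l : List Int} {c : Int} (h : ∀ v ∈ l, v ≤ c) : l.foldl max c = c := by
  induction l with
  | nil => rfl
  | cons a t ih =>
    rw [List.foldl_cons, max_eq_left (h a (by simp))]
    exact ih (fun v hv => h v (by simp [hv]))

lemma pvMF_cons_same (m : String) (c : Int) (T : List (String × Int)) (hc : 1 ≤ c)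
    (hdesc : ∀ p ∈ T, p.2 ≤ c) : pvMF ((m, c) :: T) (PySem.Str.len m) = c := by
  unfold pvMF
  rw [List.filter_cons_of_pos (by simp)]
  rw [List.map_cons, List.foldl_cons, max_eq_right (by omega)]
  apply pvFoldl_max_const
  intro v hv
  rcases List.mem_map.mp hv with ⟨p, hp, rfl⟩
  exact hdesc p (List.mem_of_mem_filter hp)

lemma pvMF_cons_ne (m : String) (c : Int) (T : List (String × Int)) (L : Int)
    (h : PySem.Str.len m ≠ L) : pvMF ((m, c) :: T) L = pvMF T L := by
  unfold pvMF
  rw [List.filter_cons_of_neg (by simpa using h)]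

lemma pvMF_perm {l₁ l₂ : List (String × Int)} (h : l₁.Perm l₂) (L : Int) : pvMF l₁ L = pvMF l₂ L := by
  unfold pvMF
  exact ((h.filter _).map _).foldl_eq 0

lemma pvMaxCount0_getD (course : List Int) (k : String) :
    (course.foldl (fun d c => d.insert (PySem.Int.toStr c) 0) PySem.Dict.empty).getD k 0 = (0 : Int) := by
  have hgen : ∀ (l : List Int) (d : PySem.Dict String Int), (∀ k', d.getD k' 0 = (0:Int)) →
      ∀ k', (l.foldl (fun d c => d.insert (PySem.Int.toStr c) 0) d).getD k' 0 = (0 : Int) := by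
    intro l
    induction l with
    | nil => intro d h k'; exact h k'
    | cons a t ih =>
      intro d h k'
      apply ih
      intro k''
      rw [PySem.Dict.getD_insert]
      split <;> [rfl; exact h k'']
  exact hgen course PySem.Dict.empty (fun _ => rfl) k

lemma pvSelA : ∀ (S : List (String × Int)) (ans : List String) (mc : PySem.Dict String Int),
      S.Pairwise (fun x y => y.2 ≤ x.2) → (∀ p ∈ S, 1 ≤ p.2) →
      (S.foldl pvSelStep (ans, mc)).1
        = ans ++ (S.filter (fun p => p.2 ==
            (if mc.getD (PySem.Int.toStr (PySem.Str.len p.1)) 0 == 0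
             then pvMF S (PySem.Str.len p.1)
             else mc.getD (PySem.Int.toStr (PySem.Str.len p.1)) 0))).map (fun p => p.1) := by
  intro S
  induction S with
  | nil => intro ans mc _ _; simp
  | cons p0 T ih =>
    rcases p0 with ⟨m, c⟩
    intro ans mc hd hv
    have hdT : T.Pairwise (fun x y => y.2 ≤ x.2) := (List.pairwise_cons.mp hd).2
    have hdhead : ∀ p ∈ T, p.2 ≤ c := fun p hp => (List.pairwise_cons.mp hd).1 p hp
    have hvT : ∀ p ∈ T, 1 ≤ p.2 := fun p hp => hv p (by simp [hp])
    have hc1 : (1 : Int) ≤ c := hv (m, c) (by simp)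
    rw [List.foldl_cons]
    set predS := (fun p : String × Int => p.2 ==
        (if mc.getD (PySem.Int.toStr (PySem.Str.len p.1)) 0 == 0
         then pvMF ((m, c) :: T) (PySem.Str.len p.1)
         else mc.getD (PySem.Int.toStr (PySem.Str.len p.1)) 0)) with hpredS
    set key0 := PySem.Int.toStr (PySem.Str.len m) with hkey0
    by_cases h0 : mc.getD key0 0 = 0
    · -- first item of this length: its count is the length's maximum
      have hstep : pvSelStep (ans, mc) (m, c) = (ans ++ [m], mc.insert key0 c) := by
        unfold pvSelStep
        simp only [← hkey0, h0]
        rfl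
      rw [hstep, ih (ans ++ [m]) (mc.insert key0 c) hdT hvT]
      have hMF : pvMF ((m, c) :: T) (PySem.Str.len m) = c := pvMF_cons_same m c T hc1 hdhead
      have hheadp : predS (m, c) = true := by
        simp only [hpredS]
        simp only [← hkey0, h0, hMF]
        simp
      have hcongr : ∀ p ∈ T, (p.2 ==
            (if (mc.insert key0 c).getD (PySem.Int.toStr (PySem.Str.len p.1)) 0 == 0
             then pvMF T (PySem.Str.len p.1)
             else (mc.insert key0 c).getD (PySem.Int.toStr (PySem.Str.len p.1)) 0))
          = predS p := by
        intro p hp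
        simp only [hpredS]
        by_cases hL : PySem.Str.len p.1 = PySem.Str.len m
        · have hkeq : PySem.Int.toStr (PySem.Str.len p.1) = key0 := by rw [hL]
          rw [hkeq, PySem.Dict.getD_insert, if_pos rfl, h0, hL, hMF]
          have hcne : ((c == 0) = false) := by
            rw [Bool.eq_false_iff]
            intro hh
            rw [beq_iff_eq] at hh
            omega
          rw [hcne]
          simp
        · have hkne : PySem.Int.toStr (PySem.Str.len p.1) ≠ key0 := by
            intro hh
            exact hL (pvToStr_inj _ _ (pvLen_nonneg _) (pvLen_nonneg _) hh)
          rw [PySem.Dict.getD_insert, if_neg hkne, pvMF_cons_ne m c T _ (fun hh => hL hh.symm)]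
      rw [List.filter_congr hcongr, List.filter_cons_of_pos hheadp, List.map_cons]
      simp
    · -- this length already carries its recorded maximum
      have h0' : (mc.getD key0 0 == 0) = false := by
        rw [Bool.eq_false_iff]; intro hh; exact h0 (beq_iff_eq.mp hh)
      have hcongr : ∀ p ∈ T, (p.2 ==
            (if mc.getD (PySem.Int.toStr (PySem.Str.len p.1)) 0 == 0
             then pvMF T (PySem.Str.len p.1)
             else mc.getD (PySem.Int.toStr (PySem.Str.len p.1)) 0))
          = predS p := by
        intro p hp
        simp only [hpredS]
        by_cases hL : PySem.Str.len p.1 = PySem.Str.len m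
        · have hkeq : PySem.Int.toStr (PySem.Str.len p.1) = key0 := by rw [hL]
          rw [hkeq, h0']
          simp
        · rw [pvMF_cons_ne m c T _ (fun hh => hL hh.symm)]
      by_cases h1 : mc.getD key0 0 = c
      · have hstep : pvSelStep (ans, mc) (m, c) = (ans ++ [m], mc) := by
          unfold pvSelStep
          simp only [← hkey0]
          rw [if_neg (by simp [h0']), if_pos (by rw [h1]; simp)]
        rw [hstep, ih (ans ++ [m]) mc hdT hvT]
        have hheadp : predS (m, c) = true := by
          simp only [hpredS]
          simp only [← hkey0, h0']
          simp only [Bool.false_eq_true, if_false, beq_iff_eq]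
          exact h1.symm
        rw [List.filter_congr hcongr, List.filter_cons_of_pos hheadp, List.map_cons]
        simp
      · have hstep : pvSelStep (ans, mc) (m, c) = (ans, mc) := by
          unfold pvSelStep
          simp only [← hkey0]
          rw [if_neg (by simp [h0']), if_neg (by simp only [beq_iff_eq]; exact h1)]
        rw [hstep, ih ans mc hdT hvT]
        have hheadp : predS (m, c) = false := by
          simp only [hpredS]
          simp only [← hkey0, h0']
          simp only [Bool.false_eq_true, if_false]
          rw [Bool.eq_false_iff]
          intro hh
          rw [beq_iff_eq] at hh
          exact h1 hh.symm
        rw [List.filter_congr hcongr, List.filter_cons_of_neg (by rw [hheadp]; simp)]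

-- ---- assembly ----

lemma pvChoose2_pos_iff (n : Nat) : 1 ≤ Nat.choose n 2 ↔ 2 ≤ n := by
  constructor
  · intro h
    by_contra hn
    push_neg at hn
    rw [Nat.choose_eq_zero_of_lt hn] at h
    omega
  · intro h
    exact Nat.choose_pos h

lemma pvMemBigA_iff (orders : List String) (course : List Int) (name : String) :
    name ∈ pvBigA orders course ↔ 2 ≤ orders.countP (pvQ course name) := by
  rw [← List.count_pos_iff, pvCount_bigA]
  constructor
  · intro h; exact (pvChoose2_pos_iff _).mp (by omega)
  · intro h; have := (pvChoose2_pos_iff _).mpr h; omega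

lemma pvMemBigB_iff (orders : List String) (course : List Int) (name : String) :
    name ∈ pvBigB orders course ↔ 1 ≤ orders.countP (pvQ course name) := by
  rw [← List.count_pos_iff, pvCount_bigB]
  omega


-- the item list of B's pairCount dictionary, and B's best dictionary
def pvPairCountItems (orders : List String) (course : List Int) : List (String × Int) :=
  ((orders.foldl (pvInnerB (PySem.Set.ofList course)) PySem.Dict.empty).items.foldl
    (fun (d : PySem.Dict String Int) (p : String × Int) =>
      if 2 ≤ p.2 then d.insert p.1 (PySem.Int.floordiv (p.2 * (p.2 - 1)) 2) else d)
    PySem.Dict.empty).items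

def pvBestD (orders : List String) (course : List Int) : PySem.Dict Int Int :=
  (pvPairCountItems orders course).foldl
    (fun (d : PySem.Dict Int Int) (p : String × Int) =>
      d.insert (PySem.Str.len p.1) (max (d.getD (PySem.Str.len p.1) 0) p.2)) PySem.Dict.empty

theorem pvMain (orders : List String) (course : List Int) :
    solution orders course = solution_alt orders course := by
  -- abbreviations
  set n : String → Nat := fun k => orders.countP (pvQ course k) with hn
  set F : String → String × Int := fun k => (k, (Nat.choose (n k) 2 : Int)) with hF
  set KA : List String := PySem.Set.ofList (pvBigA orders course) with hKA
  set KB : List String := PySem.Set.ofList (pvBigB orders course) with hKB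
  set mc0 : PySem.Dict String Int :=
    course.foldl (fun d c => d.insert (PySem.Int.toStr c) 0) PySem.Dict.empty with hmc0
  -- the A side, written out (the lets in `solution` reduce definitionally)
  have hA : solution orders course
      = PySem.List.sorted
          (((PySem.List.sorted ((pvPairs2 orders).foldl (pvInnerA course) PySem.Dict.empty).items
              (fun x => x.2) true).foldl pvSelStep (([] : List String), mc0)).1)
          (fun x => x) false := rfl
  -- the B side, written out (the lets in `solution_alt` reduce definitionally)
  have hB : solution_alt orders course
      = PySem.List.sorted
          (((pvPairCountItems orders course).filter (fun p => p.2 ==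
              (pvBestD orders course).getD (PySem.Str.len p.1) 0)).map (fun p => p.1))
          (fun x => x) false := rfl
  rw [hA, hB]
  -- the A-side item list
  have hitemsA : ((pvPairs2 orders).foldl (pvInnerA course) PySem.Dict.empty).items = KA.map F := by
    rw [pvMenuCount_eq, PySem.Dict.items_counter]
    apply List.map_congr_left
    intro k hk
    simp only [hF, hn]
    rw [pvCount_bigA]
  rw [hitemsA]
  set S := PySem.List.sorted (KA.map F) (fun x : String × Int => x.2) true with hS
  have hKAmem : ∀ k ∈ KA, 2 ≤ n k := by
    intro k hk
    rw [hKA, PySem.Set.mem_ofList] at hk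
    simp only [hn]
    exact (pvMemBigA_iff orders course k).mp hk
  have hSdesc : S.Pairwise (fun x y => y.2 ≤ x.2) :=
    PySem.List.sorted_pairwise_rev (KA.map F) (fun x => x.2)
  have hSval : ∀ p ∈ S, 1 ≤ p.2 := by
    intro p hp
    rw [hS, PySem.List.mem_sorted] at hp
    rcases List.mem_map.mp hp with ⟨k, hk, rfl⟩
    have h2 := hKAmem k hk
    have h3 := (pvChoose2_pos_iff (n k)).mpr h2
    simp only [hF]
    exact_mod_cast h3
  rw [pvSelA S [] mc0 hSdesc hSval]
  simp only [hmc0, pvMaxCount0_getD, beq_self_eq_true, if_true, List.nil_append]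
  -- the B-side item list
  have hcontain : (orders.foldl (pvInnerB (PySem.Set.ofList course)) PySem.Dict.empty).items
      = KB.map (fun k => (k, ((pvBigB orders course).count k : Int))) := by
    rw [pvContain_eq, PySem.Dict.items_counter]
  set KBf : List String := KB.filter ((fun p : String × Int => decide (2 ≤ p.2)) ∘
      (fun k => (k, ((pvBigB orders course).count k : Int)))) with hKBf
  have hKBfmem : ∀ k, k ∈ KBf ↔ 2 ≤ n k := by
    intro k
    rw [hKBf, List.mem_filter]
    simp only [hn]
    constructor
    · rintro ⟨hk, hq⟩
      simp only [Function.comp] at hq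
      rw [decide_eq_true_eq, pvCount_bigB] at hq
      exact_mod_cast hq
    · intro h
      refine ⟨?_, ?_⟩
      · rw [hKB, PySem.Set.mem_ofList]
        exact (pvMemBigB_iff orders course k).mpr (by omega)
      · simp only [Function.comp]
        rw [decide_eq_true_eq, pvCount_bigB]
        exact_mod_cast h
  have hndKBf : KBf.Nodup := by
    rw [hKBf]
    exact List.Nodup.filter _ (by rw [hKB]; exact PySem.Set.nodup_ofList _)
  have hPC : pvPairCountItems orders course = KBf.map F := by
    unfold pvPairCountItems
    rw [hcontain]
    have hfold := pvFoldl_if_filter (KB.map (fun k => (k, ((pvBigB orders course).count k : Int))))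
        (fun p : String × Int => 2 ≤ p.2)
        (fun d (p : String × Int) => d.insert p.1 (PySem.Int.floordiv (p.2 * (p.2 - 1)) 2))
        PySem.Dict.empty
    rw [hfold, List.filter_map]
    have hndmap : (((KB.filter ((fun p : String × Int => decide (2 ≤ p.2)) ∘
        (fun k => (k, ((pvBigB orders course).count k : Int))))).map
          (fun k => (k, ((pvBigB orders course).count k : Int)))).map
        (fun p : String × Int => p.1)).Nodup := by
      rw [List.map_map]
      have : ((fun p : String × Int => p.1) ∘ (fun k => (k, ((pvBigB orders course).count k : Int))))
          = fun k => k := rfl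
      rw [this]
      simpa using (hKBf ▸ hndKBf)
    have hitems := PySem.Dict.items_foldl_insert_fresh
        ((KB.filter ((fun p : String × Int => decide (2 ≤ p.2)) ∘
          (fun k => (k, ((pvBigB orders course).count k : Int))))).map
            (fun k => (k, ((pvBigB orders course).count k : Int))))
        (fun p : String × Int => p.1)
        (fun p : String × Int => PySem.Int.floordiv (p.2 * (p.2 - 1)) 2)
        PySem.Dict.empty (fun p _ => PySem.Dict.contains_empty p.1) hndmap
    rw [hitems]
    have hempty_items : (PySem.Dict.empty : PySem.Dict String Int).items = ([] : List (String × Int)) := rfl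
    rw [hempty_items, List.nil_append, List.map_map]
    rw [← hKBf]
    apply List.map_congr_left
    intro k hk
    simp only [Function.comp, hF, hn]
    rw [pvCount_bigB]
    rw [pvChoose2_int (orders.countP (pvQ course k))]
  have hbest : pvBestD orders course = (KBf.map F).foldl
      (fun (d : PySem.Dict Int Int) (p : String × Int) =>
        d.insert (PySem.Str.len p.1) (max (d.getD (PySem.Str.len p.1) 0) p.2)) PySem.Dict.empty := by
    unfold pvBestD
    rw [hPC]
  rw [hPC, hbest]
  simp only [pvBest_getD]
  -- the two item lists are permutations of one another
  have hKperm : KA.Perm KBf := by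
    rw [List.perm_ext_iff_of_nodup (by rw [hKA]; exact PySem.Set.nodup_ofList _) hndKBf]
    intro k
    rw [hKBfmem k]
    constructor
    · exact fun hk => hKAmem k hk
    · intro h
      rw [hKA, PySem.Set.mem_ofList]
      exact (pvMemBigA_iff orders course k).mpr (by simpa [hn] using h)
  have hSperm : S.Perm (KBf.map F) :=
    (PySem.List.sorted_perm (KA.map F) (fun x => x.2) true).trans (hKperm.map F)
  -- align the filter predicates and conclude
  have hpredeq : ∀ p ∈ S, (p.2 == pvMF S (PySem.Str.len p.1))
      = (p.2 == pvMF (KBf.map F) (PySem.Str.len p.1)) := by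
    intro p _
    rw [pvMF_perm hSperm]
  rw [List.filter_congr hpredeq]
  exact PySem.List.sorted_eq_sorted_of_perm _ _ (fun x => x) (fun a b h => h)
    ((hSperm.filter _).map _)

-- ===== VERDICT (by name: the statement is the Claim_ definition above) =====
theorem solution_spec : Claim_equal_solution := by
  intro orders course _
  unfold Spec_solution
  exact pvMain orders course
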